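-- pv_equiv track=rewrite | github.com/Javier-Vallejo/TFG | WeakPointsAlgorithm.py | isBetter
-- ===== SOURCE A (Python) =====
-- def isBetter(newGraphNodeCut:list,newNodes:set,maxSize:int):
--     newNodesCopy = set(newNodes)
--     while newNodesCopy:
--         newNodeCut = newNodesCopy.pop()
--         for nodeCut in newGraphNodeCut:
--             for node in nodeCut:
--                 if node == newNodeCut and len(nodeCut) < maxSize:
--                         return True
--     return False
-- ===== SOURCE B (Python) =====
-- def isBetter(newGraphNodeCut, newNodes, maxSize):
--     small = set()
--     for nodeCut in newGraphNodeCut: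
--         if len(nodeCut) < maxSize:
--             small.update(nodeCut)
--     return bool(small & set(newNodes))
-- ===== Notes on version B (the rewrite author's own statement) =====
-- stated objective: simpler
-- what changed: Instead of scanning every cut's every node once per element of newNodes, B makes one pass over the cuts to collect the union of all small cuts into a set and returns whether that set intersects newNodes.
import Mathlib
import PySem

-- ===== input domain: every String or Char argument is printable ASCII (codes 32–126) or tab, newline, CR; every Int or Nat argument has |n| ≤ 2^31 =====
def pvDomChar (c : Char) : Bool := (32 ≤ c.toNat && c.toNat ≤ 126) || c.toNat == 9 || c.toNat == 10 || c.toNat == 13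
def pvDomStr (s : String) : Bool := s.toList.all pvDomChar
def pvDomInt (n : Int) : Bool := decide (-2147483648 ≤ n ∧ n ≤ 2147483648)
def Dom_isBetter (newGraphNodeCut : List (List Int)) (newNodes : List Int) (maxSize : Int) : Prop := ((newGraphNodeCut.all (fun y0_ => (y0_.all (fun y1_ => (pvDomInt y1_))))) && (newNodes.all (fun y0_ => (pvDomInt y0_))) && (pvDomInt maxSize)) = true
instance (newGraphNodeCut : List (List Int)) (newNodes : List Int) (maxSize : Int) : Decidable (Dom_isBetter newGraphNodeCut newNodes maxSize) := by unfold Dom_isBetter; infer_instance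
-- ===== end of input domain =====

-- B builds the union of all small cuts in one pass and intersects it with newNodes (objective: simpler, one pass over the cuts).

-- ===== PORT A =====
-- A pops each element of set(newNodes) in turn and rescans every cut's nodes for it;
-- the Bool result is iteration-order independent, so the set is consumed with `any`.
def isBetter (newGraphNodeCut : List (List Int)) (newNodes : List Int) (maxSize : Int) : Bool :=
  (PySem.Set.ofList newNodes).any (fun newNodeCut =>
    newGraphNodeCut.any (fun nodeCut =>
      nodeCut.any (fun node =>
        node == newNodeCut && decide ((nodeCut.length : Int) < maxSize))))

-- ===== PORT B =====
def isBetter_alt (newGraphNodeCut : List (List Int)) (newNodes : List Int) (maxSize : Int) : Bool :=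
  let small := newGraphNodeCut.foldl
    (fun acc nodeCut =>
      if (nodeCut.length : Int) < maxSize then PySem.Set.update acc nodeCut else acc)
    PySem.Set.empty
  !(PySem.Set.inter small (PySem.Set.ofList newNodes)).isEmpty

-- ===== PRECONDITION & SPEC =====
def Spec_isBetter (newGraphNodeCut : List (List Int)) (newNodes : List Int) (maxSize : Int) (out : Bool) : Prop := out = isBetter_alt newGraphNodeCut newNodes maxSize
instance (newGraphNodeCut : List (List Int)) (newNodes : List Int) (maxSize : Int) (out : Bool) : Decidable (Spec_isBetter newGraphNodeCut newNodes maxSize out) := by unfold Spec_isBetter; infer_instance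

-- ===== CLAIM (what is proved, stated in full; the proofs are below) =====
def Claim_equal_isBetter : Prop := ∀ (newGraphNodeCut : List (List Int)) (newNodes : List Int) (maxSize : Int), Dom_isBetter newGraphNodeCut newNodes maxSize → Spec_isBetter newGraphNodeCut newNodes maxSize (isBetter newGraphNodeCut newNodes maxSize)

-- ===== LEMMAS AND PROOFS =====

theorem mem_small_foldl (maxSize : Int) (l : List (List Int)) (acc : List Int) (x : Int) :
    x ∈ l.foldl (fun acc nodeCut =>
        if (nodeCut.length : Int) < maxSize then PySem.Set.update acc nodeCut else acc) acc ↔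
      x ∈ acc ∨ ∃ cut ∈ l, (cut.length : Int) < maxSize ∧ x ∈ cut := by
  induction l generalizing acc with
  | nil => simp
  | cons c t ih =>
    simp only [List.foldl_cons, ih]
    split_ifs with h
    · rw [PySem.Set.mem_update]
      constructor
      · rintro (⟨hx | hx⟩ | ⟨cut, hc, hlt, hx⟩)
        · exact Or.inl hx
        · exact Or.inr ⟨c, by simp, h, hx⟩
        · exact Or.inr ⟨cut, by simp [hc], hlt, hx⟩
      · rintro (hx | ⟨cut, hc, hlt, hx⟩)
        · exact Or.inl (Or.inl hx)
        · rcases List.mem_cons.mp hc with rfl | hc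
          · exact Or.inl (Or.inr hx)
          · exact Or.inr ⟨cut, hc, hlt, hx⟩
    · constructor
      · rintro (hx | ⟨cut, hc, hlt, hx⟩)
        · exact Or.inl hx
        · exact Or.inr ⟨cut, by simp [hc], hlt, hx⟩
      · rintro (hx | ⟨cut, hc, hlt, hx⟩)
        · exact Or.inl hx
        · rcases List.mem_cons.mp hc with rfl | hc
          · exact absurd hlt h
          · exact Or.inr ⟨cut, hc, hlt, hx⟩

-- ===== VERDICT (by name: the statement is the Claim_ definition above) =====
theorem isBetter_spec : Claim_equal_isBetter := by
  intro g nodes maxSize _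
  unfold Spec_isBetter isBetter isBetter_alt
  rw [Bool.eq_iff_iff]
  have hmem : ∀ x : Int,
      x ∈ PySem.Set.inter
        (g.foldl (fun acc nodeCut =>
          if (nodeCut.length : Int) < maxSize then PySem.Set.update acc nodeCut else acc)
          PySem.Set.empty)
        (PySem.Set.ofList nodes) ↔
      (∃ cut ∈ g, (cut.length : Int) < maxSize ∧ x ∈ cut) ∧ x ∈ nodes := by
    intro x
    rw [PySem.Set.mem_inter, mem_small_foldl, PySem.Set.mem_ofList]
    simp [PySem.Set.empty]
  constructor
  · intro h
    simp only [List.any_eq_true, Bool.and_eq_true, beq_iff_eq, decide_eq_true_eq,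
      PySem.Set.mem_ofList] at h
    obtain ⟨nn, hnn, cut, hcut, node, hnode, heq, hlt⟩ := h
    subst heq
    have hx := (hmem node).mpr ⟨⟨cut, hcut, hlt, hnode⟩, hnn⟩
    simp only [Bool.not_eq_true']
    rw [List.isEmpty_eq_false_iff_exists_mem]
    exact ⟨node, hx⟩
  · intro h
    simp only [Bool.not_eq_true'] at h
    rw [List.isEmpty_eq_false_iff_exists_mem] at h
    obtain ⟨x, hx⟩ := h
    obtain ⟨⟨cut, hc, hlt, hxc⟩, hn⟩ := (hmem x).mp hx
    simp only [List.any_eq_true, Bool.and_eq_true, beq_iff_eq, decide_eq_true_eq,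
      PySem.Set.mem_ofList]
    exact ⟨x, hn, cut, hc, x, hxc, rfl, hlt⟩
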